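-- pv_equiv track=rewrite | github.com/cculbreath/Sprung | Sprung/flatten.py | merge_smallest_dirs
-- ===== SOURCE A (Python) =====
-- def merge_smallest_dirs(dir_locs: dict[str, int], max_files: int):
--     """
--     Merge smallest directories by LOC until only max_files remain.
--     Returns a list of lists of dir names (groups).
--     """
--     groups = [[d] for d in dir_locs.keys()]
--     locs = {d: dir_locs[d] for d in dir_locs}
--
--     while len(groups) > max_files:
--         # Find two groups with smallest combined LOC
--         smallest = sorted(groups, key=lambda g: sum(locs[d] for d in g))
--         g1, g2 = smallest[0], smallest[1]
--         new_group = g1 + g2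
--
--         # Rebuild locs and groups
--         groups.remove(g1)
--         groups.remove(g2)
--         groups.append(new_group)
--         new_key = "+".join(new_group)
--         locs[new_key] = sum(locs[d] for d in new_group if d in locs)
--
--     return groups
-- ===== SOURCE B (Python) =====
-- def merge_smallest_dirs(dir_locs: dict[str, int], max_files: int):
--     """
--     Merge smallest directories by LOC until only max_files remain.
--     Returns a list of lists of dir names (groups).
--     Selection-scan re-implementation: each group carries its cached LOC sum;
--     each round pops the two smallest-sum groups (first-of-ties) by index.
--     """
--     groups = [([d], loc) for d, loc in dir_locs.items()]
--     while len(groups) > max_files: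
--         g1, s1 = _pop_min(groups)
--         g2, s2 = _pop_min(groups)
--         groups.append((g1 + g2, s1 + s2))
--     return [g for g, _ in groups]
--
--
-- def _pop_min(groups):
--     best = None
--     for i, (_, s) in enumerate(groups):
--         if best is None or s < best[1]:
--             best = (i, s)
--     return groups.pop(best[0])
-- ===== Notes on version B (the rewrite author's own statement) =====
-- stated objective: faster
-- what changed: A re-sorts all groups every round (recomputing each group's LOC sum from a dict that grows '+'-joined keys) and removes groups by value; B keeps each group paired with its cached LOC sum and each round pops the two smallest by a single selection scan, so the sort and the locs dict disappear.
-- outside the precondition, e.g. on merge_smallest_dirs({'a': 1, 'b': 1, 'a+b': 100}, 1): A returns [['a+b', 'a', 'b']], B returns [['a', 'b', 'a+b']]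
import Mathlib
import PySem

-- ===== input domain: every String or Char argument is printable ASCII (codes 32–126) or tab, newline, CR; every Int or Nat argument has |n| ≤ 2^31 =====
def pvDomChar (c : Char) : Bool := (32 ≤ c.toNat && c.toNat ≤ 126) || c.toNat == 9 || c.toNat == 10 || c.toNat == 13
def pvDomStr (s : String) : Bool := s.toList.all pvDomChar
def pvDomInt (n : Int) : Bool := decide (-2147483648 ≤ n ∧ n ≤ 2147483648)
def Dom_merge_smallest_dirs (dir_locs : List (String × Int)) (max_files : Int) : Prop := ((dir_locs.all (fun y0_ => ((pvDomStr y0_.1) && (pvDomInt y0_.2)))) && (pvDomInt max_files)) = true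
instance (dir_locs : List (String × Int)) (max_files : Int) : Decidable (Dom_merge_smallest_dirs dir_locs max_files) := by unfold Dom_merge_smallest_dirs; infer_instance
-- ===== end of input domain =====

-- B replaces A's per-round full stable sort and its string-keyed LOC dict by a selection
-- scan over groups that carry their cached LOC sums (objective: faster by a constant factor).

-- ===== PORT A =====

-- sum(locs[d] for d in g): getD is exact here — on admitted inputs every d looked up is a key of locs
def pvSumLocs (locs : PySem.Dict String Int) (g : List String) : Int :=
  g.foldl (fun a d => a + locs.getD d 0) 0

-- sum(locs[d] for d in new_group if d in locs)
def pvNewVal (locs : PySem.Dict String Int) (g : List String) : Int :=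
  g.foldl (fun a d => if locs.contains d then a + locs.getD d 0 else a) 0

-- the while loop; fuel = initial number of groups, enough for every terminating Python run
def pvLoopA : Nat → PySem.Dict String Int → List (List String) → Int → List (List String)
  | 0, _, groups, _ => groups
  | fuel+1, locs, groups, mf =>
    if mf < (groups.length : Int) then
      match PySem.List.sorted groups (fun g => pvSumLocs locs g) with
      | g1 :: g2 :: _ =>
        let ng := g1 ++ g2
        match PySem.List.remove? groups g1 with
        | some groups1 =>
          match PySem.List.remove? groups1 g2 with
          | some groups2 =>
            pvLoopA fuel (locs.insert (PySem.Str.join "+" ng) (pvNewVal locs ng)) (groups2 ++ [ng]) mf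
          | none => groups1   -- Python raised ValueError (never happens: g2 ∈ groups1)
        | none => groups      -- Python raised ValueError (never happens: g1 ∈ groups)
      | _ => groups           -- Python raised IndexError (fewer than 2 groups); outside Pre_
    else groups

def merge_smallest_dirs (dir_locs : List (String × Int)) (max_files : Int) : List (List String) :=
  let d0 := PySem.Dict.ofList dir_locs
  let groups := d0.keys.map (fun d => [d])
  let locs := d0.keys.foldl (fun acc k => acc.insert k (d0.getD k 0)) PySem.Dict.empty
  pvLoopA groups.length locs groups max_files

-- ===== PORT B =====

-- the scan inside _pop_min: best = (i, s), first index of the minimal cached sum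
def pvFm (gs : List (List String × Int)) : Option (Int × Int) :=
  (PySem.List.enumerate gs).foldl
    (fun b p =>
      match b with
      | none => some (p.1, p.2.2)
      | some (i, s) => if p.2.2 < s then some (p.1, p.2.2) else some (i, s))
    none

-- _pop_min: scan, then groups.pop(best[0]); none = Python's TypeError on empty input, outside Pre_
def pvPopMin (gs : List (List String × Int)) :
    Option ((List String × Int) × List (List String × Int)) :=
  match pvFm gs with
  | some (i, _) => PySem.List.pop? gs i
  | none => none

-- the while loop of B; same fuel convention as A's port
def pvLoopB : Nat → List (List String × Int) → Int → List (List String × Int)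
  | 0, gs, _ => gs
  | fuel+1, gs, mf =>
    if mf < (gs.length : Int) then
      match pvPopMin gs with
      | some ((g1, s1), gs1) =>
        match pvPopMin gs1 with
        | some ((g2, s2), gs2) => pvLoopB fuel (gs2 ++ [(g1 ++ g2, s1 + s2)]) mf
        | none => gs1          -- Python raised (only one group left); outside Pre_
      | none => gs             -- Python raised (no groups); outside Pre_
    else gs

def merge_smallest_dirs_alt (dir_locs : List (String × Int)) (max_files : Int) : List (List String) :=
  let gs := (PySem.Dict.ofList dir_locs).items.map (fun p => ([p.1], p.2))
  (pvLoopB gs.length gs max_files).map (·.1)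

-- ===== PRECONDITION & SPEC =====

-- Pre_ excludes (a) inputs where A raises IndexError (max_files ≤ 0 with a nonempty dict, or
-- max_files < 0 with an empty one), and (b) inputs where some dir name extends another dir name
-- by a '+', on which A's synthetic '+'-joined keys can collide with a real dir entry and
-- silently corrupt later LOC sums.
def Pre_merge_smallest_dirs (dir_locs : List (String × Int)) (max_files : Int) : Prop :=
  (∀ p ∈ dir_locs, ∀ q ∈ dir_locs, ¬ (q.1.toList ++ ['+']) <+: p.1.toList) ∧
    (1 ≤ max_files ∨ (dir_locs = [] ∧ 0 ≤ max_files))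
instance (dir_locs : List (String × Int)) (max_files : Int) : Decidable (Pre_merge_smallest_dirs dir_locs max_files) := by
  unfold Pre_merge_smallest_dirs; infer_instance

def pvWitness_merge_smallest_dirs : (List (String × Int)) × Int := ([("a", 3), ("b", 1), ("c", 2)], 2)

def Spec_merge_smallest_dirs (dir_locs : List (String × Int)) (max_files : Int) (out : List (List String)) : Prop := out = merge_smallest_dirs_alt dir_locs max_files
instance (dir_locs : List (String × Int)) (max_files : Int) (out : List (List String)) : Decidable (Spec_merge_smallest_dirs dir_locs max_files out) := by unfold Spec_merge_smallest_dirs; infer_instance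

-- ===== CLAIM (what is proved, stated in full; the proofs are below) =====
def Claim_equal_merge_smallest_dirs : Prop := ∀ (dir_locs : List (String × Int)) (max_files : Int), Dom_merge_smallest_dirs dir_locs max_files → Pre_merge_smallest_dirs dir_locs max_files → Spec_merge_smallest_dirs dir_locs max_files (merge_smallest_dirs dir_locs max_files)

-- ===== LEMMAS AND PROOFS =====

-- i is the index of the FIRST minimal-key element of l
def IsFM {α : Type} (key : α → Int) (l : List α) (i : Nat) : Prop :=
  ∃ h : i < l.length,
    (∀ j (hj : j < i), key l[i] < key l[j]) ∧ (∀ j (hj : j < l.length), key l[i] ≤ key l[j])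

theorem insertBy_cons {α : Type} (before : α → α → Bool) (x y : α) (ys : List α) :
    PySem.List.insertBy before x (y :: ys) =
      if before x y then x :: y :: ys else y :: PySem.List.insertBy before x ys := rfl
theorem insertBy_nil {α : Type} (before : α → α → Bool) (x : α) :
    PySem.List.insertBy before x [] = [x] := rfl

theorem sorted_append_singleton {α : Type} (l : List α) (x : α) (key : α → Int) :
    PySem.List.sorted (l ++ [x]) key =
      PySem.List.insertBy (fun a b => decide (key a < key b)) x (PySem.List.sorted l key) := by
  simp [PySem.List.sorted_eq_foldl_insertBy]

theorem exists_isFM {α : Type} (key : α → Int) (l : List α) (h : l ≠ []) :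
    ∃ i, IsFM key l i := by
  induction l with
  | nil => exact absurd rfl h
  | cons x xs ih =>
    rcases eq_or_ne xs [] with rfl | hxs
    · refine ⟨0, by simp, by omega, ?_⟩
      intro j hj
      simp at hj
      subst hj; simp
    · obtain ⟨i, hi, hstrict, hmin⟩ := ih hxs
      by_cases hx : key x ≤ key (xs[i])
      · refine ⟨0, by simp, by omega, ?_⟩
        intro j hj
        match j with
        | 0 => simp
        | j+1 => simpa using le_trans hx (hmin j (by simpa using hj))
      · refine ⟨i+1, by simpa using hi, ?_, ?_⟩
        · intro j hj
          match j with
          | 0 => simpa using lt_of_not_ge hx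
          | j+1 => simpa using hstrict j (by omega)
        · intro j hj
          match j with
          | 0 => simpa using le_of_lt (lt_of_not_ge hx)
          | j+1 => simpa using hmin j (by simpa using hj)

-- head of the stable sort is the first minimal element, and the tail sorts the rest
theorem sorted_isFM {α : Type} (key : α → Int) (l : List α) (i : Nat) (h : IsFM key l i) :
    PySem.List.sorted l key = l[i]'h.1 :: PySem.List.sorted (l.eraseIdx i) key := by
  induction l using List.reverseRecOn generalizing i with
  | nil => exact absurd h.1 (by simp)
  | append_singleton t x ih =>
    obtain ⟨hi, hstrict, hmin⟩ := h
    simp only [List.length_append, List.length_singleton] at hi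
    rw [sorted_append_singleton]
    by_cases hit : i = t.length
    · subst hit
      have hx : (t ++ [x])[t.length]'(by simp) = x := by simp
      have herase : (t ++ [x]).eraseIdx t.length = t := by
        rw [List.eraseIdx_append_of_length_le (le_refl _)]; simp
      rw [herase, hx]
      rcases eq_or_ne t [] with rfl | ht
      · simp [insertBy_nil, PySem.List.sorted]
      · obtain ⟨i', hfm⟩ := exists_isFM key t ht
        rw [ih i' hfm, insertBy_cons]
        have : key x < key (t[i']'hfm.1) := by
          have := hstrict i' (by exact hfm.1)
          simpa [hx, List.getElem_append_left hfm.1] using this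
        simp only [this, decide_true, if_true]
    · have hi' : i < t.length := by omega
      have hgt : (t ++ [x])[i]'(by simp; omega) = t[i]'hi' := List.getElem_append_left hi'
      have hfm : IsFM key t i := by
        refine ⟨hi', ?_, ?_⟩
        · intro j hj
          have := hstrict j hj
          rwa [hgt, List.getElem_append_left (by omega)] at this
        · intro j hj
          have := hmin j (by simp; omega)
          rwa [hgt, List.getElem_append_left (by omega)] at this
      have hxe : key (t[i]'hi') ≤ key x := by
        have := hmin t.length (by simp)
        rw [hgt] at this
        simpa using this
      rw [ih i hfm, insertBy_cons]
      have hnb : ¬ (key x < key (t[i]'hi')) := not_lt.mpr hxe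
      simp only [hnb, decide_false, Bool.false_eq_true, if_false]
      rw [← sorted_append_singleton]
      have herase2 : (t ++ [x]).eraseIdx i = t.eraseIdx i ++ [x] :=
        List.eraseIdx_append_of_lt_length hi' _
      rw [herase2, hgt]

theorem pvFm_spec (gs : List (List String × Int)) (h : gs ≠ []) :
    ∃ (i : Nat) (hi : i < gs.length),
      pvFm gs = some (((i : Nat) : Int), gs[i].2) ∧ IsFM (fun p => p.2) gs i := by
  induction gs using List.reverseRecOn with
  | nil => exact absurd rfl h
  | append_singleton t x ih =>
    have hstep : pvFm (t ++ [x]) =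
        (fun b (p : Int × (List String × Int)) =>
          match b with
          | none => some (p.1, p.2.2)
          | some (i, s) => if p.2.2 < s then some (p.1, p.2.2) else some (i, s))
          (pvFm t) (((0 : Int) + t.length, x)) := by
      unfold pvFm
      rw [PySem.List.enumerate_append, List.foldl_append]
      simp
    rcases eq_or_ne t [] with rfl | ht
    · refine ⟨0, by simp, ?_, by simp, by omega, ?_⟩
      · simp [pvFm, PySem.List.enumerate]
      · intro j hj; simp at hj; subst hj; simp
    · obtain ⟨i, hi, hfm, _, hstrict, hmin⟩ := ih ht
      rw [hfm] at hstep
      by_cases hx : x.2 < t[i].2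
      · refine ⟨t.length, by simp, ?_, by simp, ?_, ?_⟩
        · rw [hstep]; simp [hx]
        · intro j hj
          have hj' : j < t.length := by omega
          simp only [List.getElem_concat_length, List.getElem_append_left hj']
          exact lt_of_lt_of_le hx (hmin j hj')
        · intro j hj
          simp only [List.length_append, List.length_singleton] at hj
          rcases Nat.lt_or_ge j t.length with hj' | hj'
          · simp only [List.getElem_concat_length, List.getElem_append_left hj']
            exact le_of_lt (lt_of_lt_of_le hx (hmin j hj'))
          · have : j = t.length := by omega
            subst this; simp
      · refine ⟨i, by simp; omega, ?_, by simp; omega, ?_, ?_⟩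
        · rw [hstep]; simp [hx, List.getElem_append_left hi]
        · intro j hj
          simp only [List.getElem_append_left hi, List.getElem_append_left (show j < t.length by omega)]
          exact hstrict j hj
        · intro j hj
          simp only [List.length_append, List.length_singleton] at hj
          rcases Nat.lt_or_ge j t.length with hj' | hj'
          · simp only [List.getElem_append_left hi, List.getElem_append_left hj']
            exact hmin j hj'
          · have : j = t.length := by omega
            subst this
            simp only [List.getElem_append_left hi, List.getElem_concat_length]
            exact le_of_not_gt hx

theorem remove?_first {α : Type} [BEq α] [LawfulBEq α] (l : List α) (i : Nat) (hi : i < l.length)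
    (h : ∀ j (hj : j < i), l[j] ≠ l[i]) :
    PySem.List.remove? l l[i] = some (l.eraseIdx i) := by
  induction l generalizing i with
  | nil => simp at hi
  | cons x xs ih =>
    match i with
    | 0 => simp
    | i+1 =>
      have hi' : i < xs.length := by simpa using hi
      have hne : x ≠ xs[i] := by simpa using h 0 (by omega)
      simp only [List.getElem_cons_succ]
      rw [PySem.List.remove?_cons_of_ne xs hne,
        ih i hi' (fun j hj => by simpa using h (j+1) (by omega))]
      simp [List.eraseIdx]

def pvS0 (d0 : PySem.Dict String Int) (g : List String) : Int :=
  (g.map (fun d => d0.getD d 0)).sum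

theorem pvSumLocs_eq (locs d0 : PySem.Dict String Int) (g : List String)
    (h : ∀ d ∈ g, locs.getD d 0 = d0.getD d 0) : pvSumLocs locs g = pvS0 d0 g := by
  unfold pvSumLocs pvS0
  rw [PySem.List.foldl_add, Int.zero_add]
  congr 1
  exact List.map_congr_left h

theorem join_head (h : String) (t : List String) (ht : t ≠ []) :
    ∃ rest, (PySem.Str.join "+" (h :: t)).toList = h.toList ++ '+' :: rest := by
  obtain ⟨b, t2, rfl⟩ := List.exists_cons_of_ne_nil ht
  rw [PySem.Str.toList_join]
  unfold PySem.Chars.join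
  refine ⟨(List.intersperse "+".toList (List.map String.toList (b :: t2))).flatten, ?_⟩
  simp [List.intercalate]

-- loop invariant tying A's state (locs, groups) to B's state (groups with cached sums)
def pvInv (d0 locs : PySem.Dict String Int) (gsB : List (List String × Int)) : Prop :=
  (∀ p ∈ gsB, p.1 ≠ [] ∧ (∀ d ∈ p.1, d ∈ d0.keys) ∧ p.2 = pvS0 d0 p.1) ∧
  (∀ k ∈ d0.keys, locs.getD k 0 = d0.getD k 0)

theorem pvS0_append (d0 : PySem.Dict String Int) (g1 g2 : List String) :
    pvS0 d0 (g1 ++ g2) = pvS0 d0 g1 + pvS0 d0 g2 := by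
  unfold pvS0; rw [List.map_append, List.sum_append]

theorem loop_eq (d0 : PySem.Dict String Int)
    (hpref : ∀ k ∈ d0.keys, ∀ k' ∈ d0.keys, ¬ (k'.toList ++ ['+']) <+: k.toList) :
    ∀ (fuel : Nat) (locs : PySem.Dict String Int) (gsB : List (List String × Int)) (mf : Int),
      pvInv d0 locs gsB → (1 ≤ mf ∨ (gsB = [] ∧ 0 ≤ mf)) →
      pvLoopA fuel locs (gsB.map (·.1)) mf = (pvLoopB fuel gsB mf).map (·.1) := by
  intro fuel
  induction fuel with
  | zero => intro locs gsB mf _ _; rfl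
  | succ f ih =>
    intro locs gsB mf hInv hmf
    by_cases hcond : mf < (gsB.length : Int)
    case neg =>
      simp only [pvLoopA, pvLoopB, List.length_map, hcond, if_false]
    case pos =>
      have hmf1 : 1 ≤ mf := by
        rcases hmf with h | ⟨rfl, h0⟩
        · exact h
        · simp at hcond; omega
      have hlen2 : 2 ≤ gsB.length := by
        have h1 : (1 : Int) < (gsB.length : Int) := lt_of_le_of_lt hmf1 hcond
        exact_mod_cast h1
      have hne : gsB ≠ [] := by intro h; subst h; simp at hlen2
      obtain ⟨i1, hi1, hfm1, hFM1⟩ := pvFm_spec gsB hne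
      have hpop1 : pvPopMin gsB = some (gsB[i1], gsB.eraseIdx i1) := by
        unfold pvPopMin
        rw [hfm1]
        exact PySem.List.pop?_natCast gsB i1 hi1
      have hlen1 : (gsB.eraseIdx i1).length = gsB.length - 1 := by
        rw [List.length_eraseIdx_of_lt hi1]
      have hne1 : gsB.eraseIdx i1 ≠ [] := by
        intro h; rw [← List.length_eq_zero_iff, hlen1] at h; omega
      obtain ⟨i2, hi2, hfm2, hFM2⟩ := pvFm_spec (gsB.eraseIdx i1) hne1
      have hpop2 : pvPopMin (gsB.eraseIdx i1) =
          some ((gsB.eraseIdx i1)[i2], (gsB.eraseIdx i1).eraseIdx i2) := by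
        unfold pvPopMin
        rw [hfm2]
        exact PySem.List.pop?_natCast _ i2 hi2
      -- every group's sort key equals its cached sum
      have hkey : ∀ p ∈ gsB, pvSumLocs locs p.1 = p.2 := by
        intro p hp
        obtain ⟨_, hmem, hsum⟩ := hInv.1 p hp
        rw [pvSumLocs_eq locs d0 p.1 (fun d hd => hInv.2 d (hmem d hd)), ← hsum]
      -- transfer the first-min facts to A's side
      have hFM1A : IsFM (fun g => pvSumLocs locs g) (gsB.map (·.1)) i1 := by
        obtain ⟨hi, hstrict, hmin⟩ := hFM1
        refine ⟨by simpa using hi, ?_, ?_⟩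
        · intro j hj
          simp only [List.getElem_map]
          rw [hkey _ (List.getElem_mem _), hkey _ (List.getElem_mem _)]
          exact hstrict j hj
        · intro j hj
          simp only [List.getElem_map]
          rw [hkey _ (List.getElem_mem _), hkey _ (List.getElem_mem _)]
          exact hmin j (by simpa using hj)
      have hkey1 : ∀ p ∈ gsB.eraseIdx i1, pvSumLocs locs p.1 = p.2 := by
        intro p hp
        exact hkey p ((List.eraseIdx_sublist gsB i1).mem hp)
      have hFM2A : IsFM (fun g => pvSumLocs locs g) ((gsB.eraseIdx i1).map (·.1)) i2 := by
        obtain ⟨hi, hstrict, hmin⟩ := hFM2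
        refine ⟨by simpa using hi, ?_, ?_⟩
        · intro j hj
          simp only [List.getElem_map]
          rw [hkey1 _ (List.getElem_mem _), hkey1 _ (List.getElem_mem _)]
          exact hstrict j hj
        · intro j hj
          simp only [List.getElem_map]
          rw [hkey1 _ (List.getElem_mem _), hkey1 _ (List.getElem_mem _)]
          exact hmin j (by simpa using hj)
      have hmapE : (gsB.map (·.1)).eraseIdx i1 = (gsB.eraseIdx i1).map (·.1) :=
        List.eraseIdx_map _ _ _
      have hsorted : PySem.List.sorted (gsB.map (·.1)) (fun g => pvSumLocs locs g) =
          gsB[i1].1 :: (gsB.eraseIdx i1)[i2].1 ::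
            PySem.List.sorted (((gsB.eraseIdx i1).map (·.1)).eraseIdx i2)
              (fun g => pvSumLocs locs g) := by
        rw [sorted_isFM _ _ i1 hFM1A, hmapE, sorted_isFM _ _ i2 hFM2A]
        simp
      -- removals remove exactly those indices
      have hstrict1 : ∀ j (hj : j < i1), (gsB.map (·.1))[j]'(by simp; omega) ≠
          (gsB.map (·.1))[i1]'(by simpa using hi1) := by
        intro j hj hEq
        obtain ⟨_, hstrict, _⟩ := hFM1A
        have hlt := hstrict j hj
        simp only at hlt
        rw [hEq] at hlt
        exact lt_irrefl _ hlt
      have hrm1 : PySem.List.remove? (gsB.map (·.1)) gsB[i1].1 =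
          some ((gsB.eraseIdx i1).map (·.1)) := by
        have := remove?_first (gsB.map (·.1)) i1 (by simpa using hi1) hstrict1
        rwa [List.getElem_map, hmapE] at this
      have hstrict2 : ∀ j (hj : j < i2), ((gsB.eraseIdx i1).map (·.1))[j]'(by simp; omega) ≠
          ((gsB.eraseIdx i1).map (·.1))[i2]'(by simpa using hi2) := by
        intro j hj hEq
        obtain ⟨_, hstrict, _⟩ := hFM2A
        have hlt := hstrict j hj
        simp only at hlt
        rw [hEq] at hlt
        exact lt_irrefl _ hlt
      have hrm2 : PySem.List.remove? ((gsB.eraseIdx i1).map (·.1)) (gsB.eraseIdx i1)[i2].1 =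
          some (((gsB.eraseIdx i1).eraseIdx i2).map (·.1)) := by
        have := remove?_first ((gsB.eraseIdx i1).map (·.1)) i2 (by simpa using hi2) hstrict2
        rwa [List.getElem_map, List.eraseIdx_map] at this
      -- facts about the two popped groups
      have hp1 := hInv.1 gsB[i1] (List.getElem_mem _)
      have hp2 := hInv.1 (gsB.eraseIdx i1)[i2] ((List.eraseIdx_sublist gsB i1).mem (List.getElem_mem _))
      -- one step on each side
      rw [pvLoopA, pvLoopB]
      simp only [List.length_map, hcond, if_true, hsorted, hpop1, hpop2, hrm1, hrm2]
      have hInv' : pvInv d0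
          (locs.insert (PySem.Str.join "+" (gsB[i1].1 ++ (gsB.eraseIdx i1)[i2].1))
            (pvNewVal locs (gsB[i1].1 ++ (gsB.eraseIdx i1)[i2].1)))
          ((gsB.eraseIdx i1).eraseIdx i2 ++
            [(gsB[i1].1 ++ (gsB.eraseIdx i1)[i2].1, gsB[i1].2 + (gsB.eraseIdx i1)[i2].2)]) := by
        constructor
        · intro p hp
          rcases List.mem_append.mp hp with hp | hp
          · exact hInv.1 p
              ((List.eraseIdx_sublist gsB i1).mem ((List.eraseIdx_sublist _ i2).mem hp))
          · simp only [List.mem_singleton] at hp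
            subst hp
            refine ⟨by simp [hp1.1], ?_, ?_⟩
            · intro d hd
              rcases List.mem_append.mp hd with hd | hd
              · exact hp1.2.1 d hd
              · exact hp2.2.1 d hd
            · rw [pvS0_append, ← hp1.2.2, ← hp2.2.2]
        · intro k hk
          obtain ⟨h1, t1, hg1⟩ := List.exists_cons_of_ne_nil hp1.1
          have hh1 : h1 ∈ d0.keys := hp1.2.1 h1 (by rw [hg1]; simp)
          have htail : t1 ++ (gsB.eraseIdx i1)[i2].1 ≠ [] := by simp [hp2.1]
          obtain ⟨rest, hrest⟩ := join_head h1 _ htail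
          have hne' : k ≠ PySem.Str.join "+" (gsB[i1].1 ++ (gsB.eraseIdx i1)[i2].1) := by
            intro hEq
            apply hpref k hk h1 hh1
            refine ⟨rest, ?_⟩
            rw [hEq, hg1, List.cons_append, hrest]
            simp
          rw [PySem.Dict.getD_insert_of_ne locs _ _ hne']
          exact hInv.2 k hk
      have hrec := ih _ _ mf hInv' (Or.inl hmf1)
      simpa using hrec

-- ===== VERDICT (by name: the statement is the Claim_ definition above) =====
theorem merge_smallest_dirs_spec : Claim_equal_merge_smallest_dirs := by
  intro dir_locs mf _ hpre
  unfold Spec_merge_smallest_dirs merge_smallest_dirs merge_smallest_dirs_alt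
  obtain ⟨hplusfree, hmf⟩ := hpre
  set d0 := PySem.Dict.ofList dir_locs with hd0
  have hnodup : d0.keys.Nodup := PySem.Dict.nodup_keys_ofList dir_locs
  have hkeysub : ∀ k ∈ d0.keys, ∃ p ∈ dir_locs, p.1 = k := by
    intro k hk
    have : d0.keys = PySem.Set.ofList (dir_locs.map (·.1)) := by
      rw [hd0]
      unfold PySem.Dict.ofList PySem.Dict.update
      rw [PySem.Dict.keys_foldl_insert_key dir_locs (·.1) (fun _ p => p.2) PySem.Dict.empty]
      simp [PySem.Set.update_nil_left]
    rw [this, PySem.Set.mem_ofList] at hk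
    obtain ⟨p, hp, rfl⟩ := List.mem_map.mp hk
    exact ⟨p, hp, rfl⟩
  have hkeysplus : ∀ k ∈ d0.keys, ∀ k' ∈ d0.keys, ¬ (k'.toList ++ ['+']) <+: k.toList := by
    intro k hk k' hk'
    obtain ⟨p, hp, rfl⟩ := hkeysub k hk
    obtain ⟨q, hq, rfl⟩ := hkeysub k' hk'
    exact hplusfree p hp q hq
  have hitemsD : ∀ p ∈ d0.items, d0.getD p.1 0 = p.2 := by
    intro p hp
    exact PySem.Dict.getD_of_mem_items d0 hp hnodup 0
  -- the initial locs dict agrees with d0 on every key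
  have hlocs0 : (d0.keys.foldl (fun acc k => acc.insert k (d0.getD k 0)) PySem.Dict.empty).items
      = d0.keys.map (fun k => (k, d0.getD k 0)) := by
    have := PySem.Dict.items_foldl_insert_fresh d0.keys (fun a => a) (fun a => d0.getD a 0)
      PySem.Dict.empty (fun a _ => PySem.Dict.contains_empty a) (by simpa using hnodup)
    simpa using this
  have hlocsnodup : (d0.keys.foldl (fun acc k => acc.insert k (d0.getD k 0)) PySem.Dict.empty).keys.Nodup := by
    have : (d0.keys.foldl (fun acc k => acc.insert k (d0.getD k 0)) PySem.Dict.empty).keys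
        = (d0.keys.foldl (fun acc k => acc.insert k (d0.getD k 0)) PySem.Dict.empty).items.map (·.1) := rfl
    rw [this, hlocs0, List.map_map]
    simpa [Function.comp_def] using hnodup
  have hagree : ∀ k ∈ d0.keys,
      (d0.keys.foldl (fun acc k => acc.insert k (d0.getD k 0)) PySem.Dict.empty).getD k 0 = d0.getD k 0 := by
    intro k hk
    apply PySem.Dict.getD_of_mem_items _ _ hlocsnodup
    rw [hlocs0]
    exact List.mem_map.mpr ⟨k, hk, rfl⟩
  -- initial state of B, and the invariant
  set gsB0 := d0.items.map (fun p => (([p.1] : List String), p.2)) with hgs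
  have hmapfst : d0.keys.map (fun d => [d]) = gsB0.map (·.1) := by
    simp only [hgs, PySem.Dict.keys, List.map_map]
    rfl
  have hInv0 : pvInv d0 (d0.keys.foldl (fun acc k => acc.insert k (d0.getD k 0)) PySem.Dict.empty) gsB0 := by
    constructor
    · intro p hp
      obtain ⟨q, hq, rfl⟩ := List.mem_map.mp hp
      refine ⟨by simp, ?_, ?_⟩
      · intro d hd
        simp only [List.mem_singleton] at hd
        subst hd
        exact List.mem_map.mpr ⟨q, hq, rfl⟩
      · show q.2 = pvS0 d0 [q.1]
        unfold pvS0
        simp [hitemsD q hq]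
    · exact hagree
  have hcond : 1 ≤ mf ∨ (gsB0 = [] ∧ 0 ≤ mf) := by
    rcases hmf with h | ⟨hnil, h0⟩
    · exact Or.inl h
    · right
      subst hnil
      exact ⟨rfl, h0⟩
  have := loop_eq d0 hkeysplus gsB0.length
    (d0.keys.foldl (fun acc k => acc.insert k (d0.getD k 0)) PySem.Dict.empty) gsB0 mf hInv0 hcond
  show pvLoopA (List.map (fun d => [d]) d0.keys).length
      (List.foldl (fun acc k => acc.insert k (d0.getD k 0)) PySem.Dict.empty d0.keys)
      (List.map (fun d => [d]) d0.keys) mf =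
    List.map (fun x => x.1) (pvLoopB gsB0.length gsB0 mf)
  rw [hmapfst, List.length_map]
  exact this
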